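-- pv_equiv track=rewrite | github.com/andreasparas1/naive_kyber | naive_kyber/pke.py | string_to_bit_blocks_256
-- ===== SOURCE A (Python) =====
-- def string_to_bit_blocks_256(s):
--     """
--     Converts a UTF-8 string into a list of 256-bit blocks (lists of 0s and 1s).
--     Each block represents 32 bytes (256 bits).
--     """
--     byte_array = s.encode('utf-8')
--     blocks = []
--
--     for i in range(0, len(byte_array), 32):  # 32 bytes = 256 bits
--         chunk = byte_array[i:i+32]
--         bit_list = []
--         for byte in chunk:
--             bits = [(byte >> j) & 1 for j in reversed(range(8))]
--             bit_list.extend(bits)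
--
--         if len(bit_list) < 256:
--             bit_list += [0] * (256 - len(bit_list))  # pad
--
--         blocks.append(bit_list)
--
--     return blocks
-- ===== SOURCE B (Python) =====
-- def string_to_bit_blocks_256(s):
--     """Flatten all bytes to one MSB-first bit list in a single pass, slice it
--     into consecutive 256-bit blocks, and zero-pad only the final block."""
--     byte_array = s.encode('utf-8')
--     bits = [(b >> j) & 1 for b in byte_array for j in (7, 6, 5, 4, 3, 2, 1, 0)]
--     blocks = [bits[i:i + 256] for i in range(0, len(bits), 256)]
--     if blocks:
--         last = blocks[-1]
--         blocks[-1] = last + [0] * (256 - len(last))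
--     return blocks
-- ===== Notes on version B (the rewrite author's own statement) =====
-- stated objective: alternative
-- what changed: Instead of a nested loop that bit-expands each 32-byte chunk and pads every block, B flattens all bytes into one flat MSB-first bit list in a single pass, slices it into 256-bit blocks, and pads only the final block.
import Mathlib
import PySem

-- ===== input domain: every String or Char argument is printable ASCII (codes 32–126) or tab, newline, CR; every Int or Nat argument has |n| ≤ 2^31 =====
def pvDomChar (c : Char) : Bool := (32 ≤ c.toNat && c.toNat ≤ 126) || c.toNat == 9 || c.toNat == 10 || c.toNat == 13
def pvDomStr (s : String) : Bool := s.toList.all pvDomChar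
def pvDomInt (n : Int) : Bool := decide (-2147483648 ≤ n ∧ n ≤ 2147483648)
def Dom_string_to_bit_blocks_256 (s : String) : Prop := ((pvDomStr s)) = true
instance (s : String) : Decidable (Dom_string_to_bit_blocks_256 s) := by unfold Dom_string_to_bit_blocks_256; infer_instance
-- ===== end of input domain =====

-- B changes the decomposition: one flat MSB-first bit list sliced into 256-bit blocks, padding only the last block (alternative, same cost).

-- ===== PORT A =====
-- s.encode('utf-8') : exact on the ASCII domain (each char is one byte = its code point)
def string_to_bit_blocks_256 (s : String) : List (List Int) :=
  let byte_array : List Int := s.toList.map (fun c => (c.toNat : Int))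
  (PySem.List.pyRange 0 (PySem.List.len byte_array) 32).foldl (fun blocks i =>
    let chunk := PySem.List.slice byte_array (some i) (some (i + 32))
    let bit_list := chunk.foldl (fun bl b =>
      bl ++ ((PySem.List.pyRange 0 8 1).reverse).map (fun j => PySem.Int.band (b >>> j.toNat) 1)) []
    let bit_list := if bit_list.length < 256 then
        -- [0] * (256 - len) : Nat subtraction clamps at 0 exactly like Python's list repetition
        bit_list ++ List.replicate (256 - bit_list.length) 0
      else bit_list
    blocks ++ [bit_list]) []

-- ===== PORT B =====
def string_to_bit_blocks_256_alt (s : String) : List (List Int) :=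
  let byte_array : List Int := s.toList.map (fun c => (c.toNat : Int))
  let bits : List Int := byte_array.flatMap (fun b =>
    ([7, 6, 5, 4, 3, 2, 1, 0] : List Int).map (fun j => PySem.Int.band (b >>> j.toNat) 1))
  let blocks := (PySem.List.pyRange 0 (PySem.List.len bits) 256).map (fun i =>
    PySem.List.slice bits (some i) (some (i + 256)))
  if blocks.isEmpty then blocks
  else
    -- blocks[-1] = last + [0] * (256 - len(last)) on a nonempty list: replace the last element
    let last := PySem.List.pyGetD blocks (-1) []
    blocks.dropLast ++ [last ++ List.replicate (256 - last.length) 0]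

-- ===== PRECONDITION & SPEC =====
def Spec_string_to_bit_blocks_256 (s : String) (out : List (List Int)) : Prop := out = string_to_bit_blocks_256_alt s
instance (s : String) (out : List (List Int)) : Decidable (Spec_string_to_bit_blocks_256 s out) := by unfold Spec_string_to_bit_blocks_256; infer_instance

-- ===== CLAIM (what is proved, stated in full; the proofs are below) =====
def Claim_equal_string_to_bit_blocks_256 : Prop := ∀ (s : String), Dom_string_to_bit_blocks_256 s → Spec_string_to_bit_blocks_256 s (string_to_bit_blocks_256 s)

-- ===== LEMMAS AND PROOFS =====

-- the 8 MSB-first bits of one byte (shared shape of both inner comprehensions)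
-- the shift is Int >>> Nat, the instance both ports elaborate to
def pvGbits (b : Int) : List Int :=
  ([7, 6, 5, 4, 3, 2, 1, 0] : List Int).map
    (fun j => PySem.Int.band (@HShiftRight.hShiftRight Int Nat Int Int.instHShiftRightNat b j.toNat) 1)

theorem pvGbits_length (b : Int) : (pvGbits b).length = 8 := rfl

theorem pvRevRange8 : (PySem.List.pyRange 0 8 1).reverse = ([7, 6, 5, 4, 3, 2, 1, 0] : List Int) := by decide

theorem pvFlatMap_drop (bs : List Int) (j : Nat) :
    (bs.flatMap pvGbits).drop (8 * j) = (bs.drop j).flatMap pvGbits := by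
  induction bs generalizing j with
  | nil => simp
  | cons a t ih =>
    cases j with
    | zero => simp
    | succ j =>
      have h8 : 8 * (j + 1) = (pvGbits a).length + 8 * j := by simp [pvGbits_length]; ring
      rw [List.flatMap_cons, h8, List.drop_length_add_append, List.drop_succ_cons, ih]

theorem pvFlatMap_take (bs : List Int) (m : Nat) :
    (bs.flatMap pvGbits).take (8 * m) = (bs.take m).flatMap pvGbits := by
  induction bs generalizing m with
  | nil => simp
  | cons a t ih =>
    cases m with
    | zero => simp
    | succ m =>
      have h8 : 8 * (m + 1) = (pvGbits a).length + 8 * m := by simp [pvGbits_length]; ring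
      rw [List.flatMap_cons, h8, List.take_length_add_append, List.take_succ_cons, List.flatMap_cons, ih]

theorem pvLen_flatMap (bs : List Int) : (bs.flatMap pvGbits).length = 8 * bs.length := by
  induction bs with
  | nil => rfl
  | cons a t ih => simp [List.flatMap_cons, ih, pvGbits_length]; ring

-- A's block k, written over an arbitrary byte list
def pvPad (l : List Int) : List Int :=
  if l.length < 256 then l ++ List.replicate (256 - l.length) 0 else l

def pvChunk (bs : List Int) (k : Nat) : List Int :=
  ((bs.drop (32 * k)).take 32).flatMap pvGbits

theorem pvChunk_len (bs : List Int) (k : Nat) :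
    (pvChunk bs k).length = 8 * ((bs.drop (32 * k)).take 32).length := by
  unfold pvChunk; exact pvLen_flatMap _

theorem pvChunk_len_le (bs : List Int) (k : Nat) : (pvChunk bs k).length ≤ 256 := by
  rw [pvChunk_len]
  have h : ((bs.drop (32 * k)).take 32).length ≤ 32 := List.length_take_le 32 _
  omega

theorem pvChunk_len_full (bs : List Int) (k : Nat) (h : 32 * k + 32 ≤ bs.length) :
    (pvChunk bs k).length = 256 := by
  rw [pvChunk_len]
  simp [List.length_take, List.length_drop]
  omega

theorem pvPad_eq_append (l : List Int) (h : l.length ≤ 256) :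
    pvPad l = l ++ List.replicate (256 - l.length) 0 := by
  unfold pvPad
  rcases lt_or_eq_of_le h with h' | h'
  · simp [h']
  · simp [h']

theorem pvPad_full (l : List Int) (h : l.length = 256) : pvPad l = l := by
  simp [pvPad, h]

-- the common number of blocks
def pvNB (n : Nat) : Nat := (n + 31) / 32

theorem pvRange32 (n : Nat) :
    PySem.List.pyRange 0 (n : Int) 32 = (List.range (pvNB n)).map (fun k : Nat => ((32 * k : Nat) : Int)) := by
  rw [PySem.List.pyRange_of_pos 0 (n : Int) (by norm_num)]
  have hc : (if (0 : Int) < (n : Int) then (((n : Int) - 0 + 32 - 1) / 32).toNat else 0) = pvNB n := by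
    unfold pvNB; split_ifs with h <;> omega
  rw [hc]
  apply List.map_congr_left
  intro k _
  push_cast
  ring

theorem pvRange256 (n : Nat) :
    PySem.List.pyRange 0 ((8 * n : Nat) : Int) 256 = (List.range (pvNB n)).map (fun k : Nat => ((256 * k : Nat) : Int)) := by
  rw [PySem.List.pyRange_of_pos 0 ((8 * n : Nat) : Int) (by norm_num)]
  have hc : (if (0 : Int) < ((8 * n : Nat) : Int) then ((((8 * n : Nat) : Int) - 0 + 256 - 1) / 256).toNat else 0) = pvNB n := by
    unfold pvNB; split_ifs with h <;> [skip; skip] <;> push_cast at h ⊢ <;> omega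
  rw [hc]
  apply List.map_congr_left
  intro k _
  push_cast
  ring

-- B's raw block k equals A's unpadded block k
theorem pvSlice_chunk (bs : List Int) (k : Nat) :
    PySem.List.slice (bs.flatMap pvGbits) (some ((256 * k : Nat) : Int)) (some (((256 * k : Nat) : Int) + 256)) =
      pvChunk bs k := by
  rw [show (((256 * k : Nat) : Int) + 256) = (((256 * k : Nat) : Int) + ((256 : Nat) : Int)) from rfl,
    PySem.List.slice_natCast_add]
  have hd : (bs.flatMap pvGbits).drop (256 * k) = (bs.drop (32 * k)).flatMap pvGbits := by
    have := pvFlatMap_drop bs (32 * k)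
    rwa [show 8 * (32 * k) = 256 * k by ring] at this
  rw [hd, show (256 : Nat) = 8 * 32 from rfl, pvFlatMap_take]
  rfl

-- A's block k over an arbitrary byte list
theorem pvSlice_chunkA (bs : List Int) (k : Nat) :
    (PySem.List.slice bs (some ((32 * k : Nat) : Int)) (some (((32 * k : Nat) : Int) + 32))).flatMap pvGbits =
      pvChunk bs k := by
  rw [show (((32 * k : Nat) : Int) + 32) = (((32 * k : Nat) : Int) + ((32 : Nat) : Int)) from rfl,
    PySem.List.slice_natCast_add]
  rfl

-- the heart of the file: both shapes agree for every byte list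
theorem pvMain (bs : List Int) :
    (List.range (pvNB bs.length)).map (fun k => pvPad (pvChunk bs k)) =
      (let blocks := (List.range (pvNB bs.length)).map (fun k => pvChunk bs k)
       if blocks.isEmpty then blocks
       else blocks.dropLast ++ [(PySem.List.pyGetD blocks (-1) []) ++
         List.replicate (256 - (PySem.List.pyGetD blocks (-1) []).length) 0]) := by
  set N := pvNB bs.length with hN
  cases hNz : N with
  | zero => simp
  | succ m =>
    have hrange : List.range (m + 1) = List.range m ++ [m] := List.range_succ
    have hfull : ∀ k ∈ List.range m, pvPad (pvChunk bs k) = pvChunk bs k := by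
      intro k hk
      have hk' : k < m := List.mem_range.mp hk
      apply pvPad_full
      apply pvChunk_len_full
      have : m + 1 = (bs.length + 31) / 32 := by rw [← hNz, hN]; rfl
      omega
    simp only [hrange, List.map_append, List.map_cons, List.map_nil]
    have hne : ¬ ((List.range m).map (fun k => pvChunk bs k) ++ [pvChunk bs m]).isEmpty = true := by
      simp
    rw [if_neg hne]
    rw [PySem.List.pyGetD_neg_one_append_singleton, List.dropLast_concat]
    rw [List.map_congr_left hfull]
    congr 1
    rw [pvPad_eq_append _ (pvChunk_len_le bs m)]

-- ===== VERDICT (by name: the statement is the Claim_ definition above) =====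
theorem string_to_bit_blocks_256_spec : Claim_equal_string_to_bit_blocks_256 := by
  intro s _
  unfold Spec_string_to_bit_blocks_256 string_to_bit_blocks_256 string_to_bit_blocks_256_alt
  set bs : List Int := s.toList.map (fun c => (c.toNat : Int)) with hbs
  have hg : (fun b : Int => ([7, 6, 5, 4, 3, 2, 1, 0] : List Int).map
      (fun j => PySem.Int.band (@HShiftRight.hShiftRight Int Nat Int Int.instHShiftRightNat b j.toNat) 1)) = pvGbits := rfl
  simp only [PySem.List.len_eq, PySem.List.foldl_append_singleton_eq_map, List.nil_append,
    PySem.List.foldl_append_eq_flatMap, pvRevRange8]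
  rw [hg]
  rw [pvLen_flatMap bs, pvRange32 bs.length, pvRange256 bs.length, List.map_map, List.map_map]
  have hA : ∀ k ∈ List.range (pvNB bs.length),
      ((fun i : Int =>
          let bl := (PySem.List.slice bs (some i) (some (i + 32))).flatMap pvGbits
          if bl.length < 256 then bl ++ List.replicate (256 - bl.length) 0 else bl) ∘
        (fun k : Nat => ((32 * k : Nat) : Int))) k = pvPad (pvChunk bs k) := by
    intro k _
    simp only [Function.comp_apply, pvSlice_chunkA bs k, pvPad]
  have hB : ∀ k ∈ List.range (pvNB bs.length),
      ((fun i : Int => PySem.List.slice (bs.flatMap pvGbits) (some i) (some (i + 256))) ∘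
        (fun k : Nat => ((256 * k : Nat) : Int))) k = pvChunk bs k := by
    intro k _
    simp only [Function.comp_apply]
    exact pvSlice_chunk bs k
  rw [List.map_congr_left hA, List.map_congr_left hB]
  simpa using pvMain bs
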